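-- pv_equiv track=rewrite | github.com/DiggsPapu/AlgorithmsAnalysis | Problema1.py | total_combinations
-- ===== SOURCE A (Python) =====
-- def count_combinations(keypad, moves, start_digit, remaining_length, memo):
--     # Base case: si la longitud restante es 0, devuelve 1
--     if remaining_length == 0:
--         return 1
--
--     # Checar memoización para evitar cálculos repetidos
--     if (start_digit, remaining_length) in memo:
--         return memo[(start_digit, remaining_length)]
--
--     # Iniciar el conteo de combinaciones desde el dígito inicial
--     total_combinations = 0
--
--     # Recorrer cada movimiento posible desde el dígito inicial
--     for next_digit in moves[start_digit]:
--         # Llamar recursivamente para la longitud restante menor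
--         total_combinations += count_combinations(keypad, moves, next_digit, remaining_length - 1, memo)
--
--     # Almacenar el resultado en memoización
--     memo[(start_digit, remaining_length)] = total_combinations
--
--     # Devolver el total de combinaciones calculadas
--     return total_combinations
--
-- def total_combinations(n):
--     # Definir la estructura del teclado y los movimientos permitidos desde cada dígito
--     keypad = [
--         ['1', '2', '3'],
--         ['4', '5', '6'],
--         ['7', '8', '9'],
--         ['*', '0', '#']
--     ]
--
--     # Mapear los movimientos permitidos desde cada dígito
--     moves = {
--         '0': ['0', '8'],
--         '1': ['1', '2', '4'],
--         '2': ['1', '2', '3', '5'],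
--         '3': ['2', '3', '6'],
--         '4': ['1', '4', '5', '7'],
--         '5': ['2', '4', '5', '6', '8'],
--         '6': ['3', '5', '6', '9'],
--         '7': ['4', '7', '8'],
--         '8': ['5', '7', '8', '9', '0'],
--         '9': ['6', '8', '9']
--     }
--
--     # Crear un diccionario de memoización para almacenar resultados
--     memo = {}
--
--     # Inicializar el total de combinaciones
--     total = 0
--
--     # Contar combinaciones para cada dígito inicial del 0 al 9
--     for digit in '0123456789':
--         total += count_combinations(keypad, moves, digit, n, memo)
--
--     return total
-- ===== SOURCE B (Python) =====
-- MOVES = [[0, 8], [1, 2, 4], [1, 2, 3, 5], [2, 3, 6], [1, 4, 5, 7],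
--          [2, 4, 5, 6, 8], [3, 5, 6, 9], [4, 7, 8], [5, 7, 8, 9, 0], [6, 8, 9]]
--
-- def total_combinations(n):
--     # bottom-up vector DP: counts[d] = number of sequences of the remaining length starting at d
--     counts = [1] * 10
--     for _ in range(n):
--         counts = [sum(counts[j] for j in MOVES[d]) for d in range(10)]
--     return sum(counts)
-- ===== Notes on version B (the rewrite author's own statement) =====
-- stated objective: alternative
-- what changed: Replaced the memoized top-down recursion over a (digit, length) dict with a bottom-up iteration of a ten-entry count vector, one step per remaining length.
import Mathlib
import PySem

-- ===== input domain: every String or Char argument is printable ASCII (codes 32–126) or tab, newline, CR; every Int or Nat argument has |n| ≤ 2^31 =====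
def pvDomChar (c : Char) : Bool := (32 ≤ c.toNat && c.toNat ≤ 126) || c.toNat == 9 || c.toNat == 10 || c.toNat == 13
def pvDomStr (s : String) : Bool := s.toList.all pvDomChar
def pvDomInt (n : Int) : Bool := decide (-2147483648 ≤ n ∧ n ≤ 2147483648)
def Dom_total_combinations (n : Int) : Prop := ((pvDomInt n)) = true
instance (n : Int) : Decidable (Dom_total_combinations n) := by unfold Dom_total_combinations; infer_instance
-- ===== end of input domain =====

-- B replaces A's memoized top-down recursion by a bottom-up 10-entry vector iteration (alternative decomposition, same O(n)).
-- Pre_ restricts to n ≥ 0: for n < 0 Python A recurses without a base case and raises RecursionError.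


-- ===== PORT A =====
-- moves dict of A, as a function from digit char to its move list
def aMoves : Char → List Char
  | '0' => ['0', '8']
  | '1' => ['1', '2', '4']
  | '2' => ['1', '2', '3', '5']
  | '3' => ['2', '3', '6']
  | '4' => ['1', '4', '5', '7']
  | '5' => ['2', '4', '5', '6', '8']
  | '6' => ['3', '5', '6', '9']
  | '7' => ['4', '7', '8']
  | '8' => ['5', '7', '8', '9', '0']
  | '9' => ['6', '8', '9']
  | _ => []

-- count_combinations with its memo dict threaded through (keypad is unused by A's code and dropped);
-- remaining_length is n.toNat: exact for the n ≥ 0 of Pre_ (Python recurses forever below 0).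
-- The memo dict is internal state (only ever read back with get?/insert, never returned), keyed exactly
-- as Python's (digit, remaining_length) tuple; it is stored in a Std.HashMap, whose get?/insert behave
-- like Python's dict lookups. count_combinations, its 'for next_digit in moves[...]' loop and the
-- outer 'for digit in ...' loop of total_combinations are one worklist recursion (aCount ds k acc memo
-- = acc + the sum of count_combinations(_, moves, d, k, memo) over d in ds, with the memo threaded in
-- Python's exact visit order): same memo keys, same base case, same accumulation order; written as a
-- single recursive function so the interpreter spends one stack frame per Python recursion level and
-- deep (large-n) inputs evaluate.
def aCount (ds : List Char) (k : Nat) (acc : Int) (memo : Std.HashMap (Char × Nat) Int) :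
    Int × Std.HashMap (Char × Nat) Int :=
  match ds with
  | [] => (acc, memo)
  | d :: rest =>
    match k with
    | 0 => aCount rest 0 (acc + 1) memo           -- Python: remaining_length == 0 → 1
    | Nat.succ k' =>
      match memo[(d, k' + 1)]? with               -- Python: memo hit
      | some v => aCount rest (k' + 1) (acc + v) memo
      | none =>                                   -- Python: sum over moves[d], then memoize
        match aCount (aMoves d) k' 0 memo with
        | (t, m) => aCount rest (k' + 1) (acc + t) (m.insert (d, k' + 1) t)
termination_by (k, ds.length)

def total_combinations (n : Int) : Int :=
  (aCount ("0123456789".toList) n.toNat 0 (∅ : Std.HashMap (Char × Nat) Int)).1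

-- ===== PORT B =====
def bMoves : Nat → List Nat
  | 0 => [0, 8]
  | 1 => [1, 2, 4]
  | 2 => [1, 2, 3, 5]
  | 3 => [2, 3, 6]
  | 4 => [1, 4, 5, 7]
  | 5 => [2, 4, 5, 6, 8]
  | 6 => [3, 5, 6, 9]
  | 7 => [4, 7, 8]
  | 8 => [5, 7, 8, 9, 0]
  | 9 => [6, 8, 9]
  | _ => []

-- one loop iteration: counts = [sum(counts[j] for j in MOVES[d]) for d in range(10)]
-- (counts[j] ported as getD: every index in bMoves is in range of the 10-entry list)
def bStep (counts : List Int) : List Int :=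
  (List.range 10).map (fun d => ((bMoves d).map (fun j => counts.getD j 0)).sum)

def total_combinations_alt (n : Int) : Int :=
  (bStep^[n.toNat] (List.replicate 10 1)).sum

-- ===== PRECONDITION & SPEC =====
-- Pre_ excludes n < 0, on which A's recursion has no base case and raises RecursionError
def Pre_total_combinations (n : Int) : Prop := 0 ≤ n
instance (n : Int) : Decidable (Pre_total_combinations n) := by
  unfold Pre_total_combinations; infer_instance

def pvWitness_total_combinations : Int := 3

def Spec_total_combinations (n : Int) (out : Int) : Prop := out = total_combinations_alt n
instance (n : Int) (out : Int) : Decidable (Spec_total_combinations n out) := by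
  unfold Spec_total_combinations; infer_instance

-- ===== CLAIM (what is proved, stated in full; the proofs are below) =====
def Claim_equal_total_combinations : Prop :=
  ∀ (n : Int), Dom_total_combinations n → Pre_total_combinations n →
    Spec_total_combinations n (total_combinations n)

-- ===== LEMMAS AND PROOFS =====

-- pure count: number of sequences of length k+ (starting digit) on the keypad graph
def pc : Char → Nat → Int
  | _, 0 => 1
  | '0', k + 1 => pc '0' k + pc '8' k
  | '1', k + 1 => pc '1' k + pc '2' k + pc '4' k
  | '2', k + 1 => pc '1' k + pc '2' k + pc '3' k + pc '5' k
  | '3', k + 1 => pc '2' k + pc '3' k + pc '6' k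
  | '4', k + 1 => pc '1' k + pc '4' k + pc '5' k + pc '7' k
  | '5', k + 1 => pc '2' k + pc '4' k + pc '5' k + pc '6' k + pc '8' k
  | '6', k + 1 => pc '3' k + pc '5' k + pc '6' k + pc '9' k
  | '7', k + 1 => pc '4' k + pc '7' k + pc '8' k
  | '8', k + 1 => pc '5' k + pc '7' k + pc '8' k + pc '9' k + pc '0' k
  | '9', k + 1 => pc '6' k + pc '8' k + pc '9' k
  | _, _ + 1 => 0

def DIGITS : List Char := ['0', '1', '2', '3', '4', '5', '6', '7', '8', '9']

lemma pc_succ (d : Char) (hd : d ∈ DIGITS) (k : Nat) :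
    pc d (k + 1) = ((aMoves d).map (fun e => pc e k)).sum := by
  fin_cases hd <;> simp [pc, aMoves] <;> ring

-- memo invariant: every stored value is the pure count of its key
def MemoInv (m : Std.HashMap (Char × Nat) Int) : Prop :=
  ∀ (p : Char × Nat) (v : Int), m[p]? = some v → v = pc p.1 p.2

lemma moves_sub : ∀ d ∈ DIGITS, ∀ e ∈ aMoves d, e ∈ DIGITS := by
  intro d hd
  fin_cases hd <;> · intro e he; fin_cases he <;> simp [DIGITS]

lemma aCount_correct : ∀ (k : Nat) (ds : List Char), (∀ d ∈ ds, d ∈ DIGITS) →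
    ∀ (acc : Int) m, MemoInv m →
      (aCount ds k acc m).1 = acc + (ds.map (fun d => pc d k)).sum ∧
        MemoInv (aCount ds k acc m).2 := by
  intro k
  induction k using Nat.strong_induction_on with
  | _ k ihk =>
    intro ds
    induction ds with
    | nil => intro _ acc m h; exact ⟨by simp [aCount], by simpa [aCount] using h⟩
    | cons d rest ihd =>
      intro hsub acc m h
      have hdig : d ∈ DIGITS := hsub d (by simp)
      have hrest : ∀ x ∈ rest, x ∈ DIGITS := fun x hx => hsub x (by simp [hx])
      match k with
      | 0 =>
        have := ihd hrest (acc + 1) m h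
        refine ⟨?_, by simpa [aCount] using this.2⟩
        simp only [aCount]
        rw [this.1]
        simp [pc, add_assoc]
      | Nat.succ k' =>
        simp only [aCount]
        cases hm : m[(d, k' + 1)]? with
        | some v =>
          have hv : v = pc d (k' + 1) := h (d, k' + 1) v hm
          have := ihd hrest (acc + v) m h
          refine ⟨?_, this.2⟩
          rw [this.1, hv]
          simp [add_assoc]
        | none =>
          have hin := ihk k' (Nat.lt_succ_self k') (aMoves d) (moves_sub d hdig) 0 m h
          have ht : (aCount (aMoves d) k' 0 m).1 = pc d (k' + 1) := by
            simpa [pc_succ d hdig k'] using hin.1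
          have hm2 : MemoInv ((aCount (aMoves d) k' 0 m).2.insert (d, k' + 1)
              (aCount (aMoves d) k' 0 m).1) := by
            intro p v hv
            rw [Std.HashMap.getElem?_insert] at hv
            by_cases hp : p = (d, k' + 1)
            · rw [if_pos (by simp [hp])] at hv
              cases hv
              rw [hp, ht]
            · rw [if_neg (by simp; exact fun h => hp h.symm)] at hv
              exact hin.2 p v hv
          have := ihd hrest (acc + (aCount (aMoves d) k' 0 m).1)
            ((aCount (aMoves d) k' 0 m).2.insert (d, k' + 1) (aCount (aMoves d) k' 0 m).1) hm2
          refine ⟨?_, this.2⟩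
          rw [this.1, ht]
          simp [add_assoc]

def pvec (k : Nat) : List Int := DIGITS.map (fun d => pc d k)

lemma bStep_pvec (k : Nat) : bStep (pvec k) = pvec (k + 1) := by
  simp [bStep, pvec, DIGITS, bMoves, pc, List.range_succ, List.getD]
  and_intros <;> ring

lemma iterate_pvec : ∀ k : Nat, bStep^[k] (List.replicate 10 1) = pvec k := by
  intro k
  induction k with
  | zero => rfl
  | succ k ih => rw [Function.iterate_succ_apply', ih, bStep_pvec]

-- ===== VERDICT (by name: the statement is the Claim_ definition above) =====
theorem total_combinations_spec : Claim_equal_total_combinations := by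
  intro n _ _
  unfold Spec_total_combinations total_combinations total_combinations_alt
  rw [iterate_pvec]
  rw [show ("0123456789".toList) = DIGITS from rfl]
  rw [(aCount_correct n.toNat DIGITS (fun d hd => hd) 0 (∅ : Std.HashMap (Char × Nat) Int)
      (by intro p v h; simp at h)).1]
  simp [pvec, DIGITS]
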